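-- pv_equiv track=rewrite | github.com/YagiUda/domainBlender | data_merger.py | explode_domain
-- ===== SOURCE A (Python) =====
-- def explode_domain(domain, alltld_list):
--     '''explode_domain(domain, alltld_list) -> str, str, str
--
--     Function to split a domain to obtain the subdomain, the core domain and the
--     TLD'''
--
--     core_domain = ""
--     tld = ""
--     subdomain = ""
--
--     tmp_tldlist = []
--
--     # Loop to test with all the TLDs
--     for tmp_tld in alltld_list:
--
--         # Get the location of the TLD pattern in the domain name
--         findloc=domain.rfind(tmp_tld)
--
--         # Verify tmp_tld is in the domain
--         if findloc != -1:
--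
--             # Verify tmp_tld is not the full value of domain
--             # (i.e. if domain="gc.ca")
--             if findloc != 0:
--                 domain_length=len(domain)
--                 tld_length=len(tmp_tld)
--
--                 # Verify the string found in the domain is at the end (tld)
--                 if findloc + tld_length == domain_length:
--
--                     # Verify the domain and tld are separated by "."
--                     if domain[domain_length - tld_length -1] == ".":
--
--                         # Verify if the tmp_tld is longer than a previously
--                         # found tld to catch long tld such as "gc.ca" vice
--                         # "ca")
--                         if len(tld) < len(tmp_tld):
--                             tld = tmp_tld
--                             tmp_domain = domain.rsplit("." + tld, 1)[0]
--
--                             # Verify the domain includes a subdomain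
--                             findloc=tmp_domain.rfind(".")
--                             if findloc != -1:
--                                 core_domain = tmp_domain.rsplit(".", 1)[1]
--                                 subdomain = tmp_domain.rsplit("." + core_domain, 1)[0]
--
--                             else:
--                                 core_domain = tmp_domain
--                                 subdomain = ""
--
--     return subdomain, core_domain, tld
-- ===== SOURCE B (Python) =====
-- def explode_domain(domain, alltld_list):
--     '''explode_domain(domain, alltld_list) -> str, str, str
--
--     Split a domain into subdomain, core domain and TLD.
--
--     Instead of scanning the domain once per TLD in the list, build a set of
--     the TLDs once and walk the domain left to right: the first dot whose
--     (non-empty) suffix is a known TLD marks the longest matching TLD.'''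
--     tlds = set(alltld_list)
--     n = len(domain)
--     for i, ch in enumerate(domain):
--         if ch == "." and i + 1 < n and domain[i + 1:] in tlds:
--             rest = domain[:i]
--             j = rest.rfind(".")
--             if j == -1:
--                 return "", rest, domain[i + 1:]
--             return rest[:j], rest[j + 1:], domain[i + 1:]
--     return "", "", ""
-- ===== Notes on version B (the rewrite author's own statement) =====
-- stated objective: faster
-- what changed: A rescans the whole domain once per entry of the TLD list (rfind per TLD, keeping the longest hit); B builds a set of the TLDs once and walks the domain left to right, returning at the first dot whose non-empty suffix is in the set (which is exactly the longest matching TLD), then splits off the core domain at the last dot of the remaining prefix.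
import Mathlib
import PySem

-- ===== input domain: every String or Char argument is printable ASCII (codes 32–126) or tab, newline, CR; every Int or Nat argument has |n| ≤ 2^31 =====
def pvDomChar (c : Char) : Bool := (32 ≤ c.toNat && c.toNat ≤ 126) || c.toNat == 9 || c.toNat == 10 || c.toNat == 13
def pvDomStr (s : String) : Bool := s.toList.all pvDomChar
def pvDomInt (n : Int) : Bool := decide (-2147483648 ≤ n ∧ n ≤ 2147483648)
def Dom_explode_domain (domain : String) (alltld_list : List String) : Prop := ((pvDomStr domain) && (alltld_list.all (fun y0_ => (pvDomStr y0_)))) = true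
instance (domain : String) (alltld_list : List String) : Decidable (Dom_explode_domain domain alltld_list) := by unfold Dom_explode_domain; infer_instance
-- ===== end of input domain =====

-- B replaces A's per-TLD rescan of the domain by one left-to-right scan of the
-- domain against a set of TLDs (first matching dot = longest TLD); equal results.

-- ===== PORT A =====
-- s.rsplit(sep, 1)[0] for nonempty sep: the part before the LAST occurrence of
-- sep, or the whole string when sep does not occur (exact: rfind = last index)
def pyRsplit1Head (s sep : List Char) : List Char :=
  let i := PySem.Chars.rfind s sep
  if i = -1 then s else PySem.Chars.slice s none (some i)

-- one iteration of A's `for tmp_tld in alltld_list` over state (subdomain, core_domain, tld)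
def explodeStepA (domain : List Char) (st : List Char × List Char × List Char)
    (tmp_tld : List Char) : List Char × List Char × List Char :=
  let findloc := PySem.Chars.rfind domain tmp_tld
  if findloc ≠ -1 then
    if findloc ≠ 0 then
      let domain_length : Int := domain.length
      let tld_length : Int := tmp_tld.length
      if findloc + tld_length = domain_length then
        -- domain[domain_length - tld_length - 1] == "." (the index is in range on this path)
        if PySem.Chars.pyGet? domain (domain_length - tld_length - 1) = some '.' then
          if st.2.2.length < tmp_tld.length then
            let tmp_domain := pyRsplit1Head domain ('.' :: tmp_tld)
            let findloc2 := PySem.Chars.rfind tmp_domain ['.']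
            if findloc2 ≠ -1 then
              -- tmp_domain.rsplit(".", 1)[1]: "." occurs, its last index is findloc2
              let core := PySem.Chars.slice tmp_domain (some (findloc2 + 1)) none
              (pyRsplit1Head tmp_domain ('.' :: core), core, tmp_tld)
            else
              ([], tmp_domain, tmp_tld)
          else st
        else st
      else st
    else st
  else st

def explode_domain (domain : String) (alltld_list : List String) : String × String × String :=
  let r := alltld_list.foldl (fun st t => explodeStepA domain.toList st t.toList) ([], [], [])
  (String.ofList r.1, String.ofList r.2.1, String.ofList r.2.2)

-- ===== PORT B =====
-- B's `for i, ch in enumerate(domain)` with early return; pre = domain[:i]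
def explodeGoB (tlds : PySem.Set (List Char)) (pre : List Char) :
    List Char → List Char × List Char × List Char
  | [] => ([], [], [])
  | c :: rest =>
    if c = '.' ∧ rest ≠ [] ∧ rest ∈ tlds then
      let j := PySem.Chars.rfind pre ['.']
      if j = -1 then ([], pre, rest)
      else (PySem.Chars.slice pre none (some j), PySem.Chars.slice pre (some (j + 1)) none, rest)
    else explodeGoB tlds (pre ++ [c]) rest

def explode_domain_alt (domain : String) (alltld_list : List String) : String × String × String :=
  let tlds := PySem.Set.ofList (alltld_list.map String.toList)
  let r := explodeGoB tlds [] domain.toList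
  (String.ofList r.1, String.ofList r.2.1, String.ofList r.2.2)

-- ===== PRECONDITION & SPEC =====
def Spec_explode_domain (domain : String) (alltld_list : List String) (out : String × String × String) : Prop := out = explode_domain_alt domain alltld_list
instance (domain : String) (alltld_list : List String) (out : String × String × String) : Decidable (Spec_explode_domain domain alltld_list out) := by unfold Spec_explode_domain; infer_instance

-- ===== CLAIM (what is proved, stated in full; the proofs are below) =====
def Claim_equal_explode_domain : Prop := ∀ (domain : String) (alltld_list : List String), Dom_explode_domain domain alltld_list → Spec_explode_domain domain alltld_list (explode_domain domain alltld_list)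

-- ===== LEMMAS AND PROOFS =====

-- the split result once the matching dot position is known (pre = text before the dot, t = the tld)
def pvSplitAt (pre t : List Char) : List Char × List Char × List Char :=
  let j := PySem.Chars.rfind pre ['.']
  if j = -1 then ([], pre, t)
  else (PySem.Chars.slice pre none (some j), PySem.Chars.slice pre (some (j + 1)) none, t)

-- A's running best tld, one list element at a time
def pvPick (d b t : List Char) : List Char :=
  if t ≠ [] ∧ '.' :: t <:+ d ∧ b.length < t.length then t else b

-- the loop state A holds when its best tld so far is b
def pvState (d b : List Char) : List Char × List Char × List Char :=
  if b = [] then ([], [], []) else pvSplitAt (d.take (d.length - b.length - 1)) b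

lemma pvState_snd (d b : List Char) : (pvState d b).2.2 = b := by
  unfold pvState pvSplitAt
  by_cases h : b = []
  · rw [if_pos h, h]
  · rw [if_neg h]
    by_cases hf : PySem.Chars.rfind (List.take (d.length - b.length - 1) d) ['.'] = -1 <;>
      simp [hf]

-- rfind.go facts
lemma pv_go_found (s sub : List Char) (k : Nat) (h : PySem.Chars.rfind.go s sub k ≠ -1) :
    ∃ m ≤ k, PySem.Chars.rfind.go s sub k = (m : Int) ∧ sub <+: s.drop m := by
  induction k with
  | zero =>
    simp only [PySem.Chars.rfind.go] at h ⊢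
    split_ifs at h ⊢ with hp
    · exact ⟨0, le_refl 0, rfl, by simpa using List.isPrefixOf_iff_prefix.1 hp⟩
    · exact absurd rfl h
  | succ k ih =>
    simp only [PySem.Chars.rfind.go] at h ⊢
    split_ifs at h ⊢ with hp
    · exact ⟨k + 1, le_refl _, rfl, List.isPrefixOf_iff_prefix.1 hp⟩
    · obtain ⟨m, hm, he, hpre⟩ := ih h
      exact ⟨m, Nat.le_succ_of_le hm, he, hpre⟩

lemma pv_go_eq (s sub : List Char) (k m : Nat) (hm : m ≤ k)
    (hp : sub <+: s.drop m) (hn : ∀ j, m < j → j ≤ k → ¬ sub <+: s.drop j) :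
    PySem.Chars.rfind.go s sub k = (m : Int) := by
  induction k with
  | zero =>
    interval_cases m
    simp only [PySem.Chars.rfind.go, List.drop_zero] at hp ⊢
    rw [if_pos (List.isPrefixOf_iff_prefix.2 (by simpa using hp))]
    simp
  | succ k ih =>
    rcases Nat.lt_or_ge m (k + 1) with hlt | hge
    · simp only [PySem.Chars.rfind.go]
      rw [if_neg (by
        intro hpf
        exact hn (k + 1) hlt (le_refl _) (List.isPrefixOf_iff_prefix.1 hpf))]
      exact ih (Nat.lt_succ_iff.1 hlt) (fun j hj hjk => hn j hj (Nat.le_succ_of_le hjk))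
    · have : m = k + 1 := le_antisymm hm hge
      subst this
      simp only [PySem.Chars.rfind.go]
      rw [if_pos (List.isPrefixOf_iff_prefix.2 hp)]

lemma pv_rfind_found (s sub : List Char) (h : PySem.Chars.rfind s sub ≠ -1) :
    ∃ m ≤ s.length, PySem.Chars.rfind s sub = (m : Int) ∧ sub <+: s.drop m :=
  pv_go_found s sub s.length h

-- rfind of a nonempty suffix is its start index
lemma pv_rfind_suffix (s sub : List Char) (hs : sub <:+ s) :
    PySem.Chars.rfind s sub = ((s.length - sub.length : Nat) : Int) := by
  have hlen : sub.length ≤ s.length := hs.length_le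
  obtain ⟨p, hp⟩ := hs
  refine pv_go_eq s sub s.length (s.length - sub.length) (Nat.sub_le _ _) ?_ ?_
  · have hplen : p.length = s.length - sub.length := by
      have := congrArg List.length hp
      simp at this
      omega
    rw [← hplen, ← hp, List.drop_left]
  · intro j hj hjk hpf
    have h1 : (s.drop j).length = s.length - j := by simp
    have := hpf.length_le
    omega

-- A's step is: update to pvSplitAt iff t is a usable tld longer than the current best
lemma pv_stepA_valid (d t : List Char) (st : List Char × List Char × List Char)
    (hs : '.' :: t <:+ d) (hl : st.2.2.length < t.length) :
    explodeStepA d st t = pvSplitAt (d.take (d.length - t.length - 1)) t := by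
  have hts : t <:+ d := List.IsSuffix.trans ⟨['.'], rfl⟩ hs
  have hlen1 : t.length + 1 ≤ d.length := by simpa using hs.length_le
  have hr : PySem.Chars.rfind d t = ((d.length - t.length : Nat) : Int) :=
    pv_rfind_suffix d t hts
  have hr2 : PySem.Chars.rfind d ('.' :: t) = ((d.length - (t.length + 1) : Nat) : Int) := by
    simpa using pv_rfind_suffix d ('.' :: t) hs
  have hg4 : PySem.Chars.pyGet? d ((d.length : Int) - (t.length : Int) - 1) = some '.' := by
    have hk : ((d.length : Int) - (t.length : Int) - 1) = ((d.length - t.length - 1 : Nat) : Int) := by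
      omega
    obtain ⟨p, hp⟩ := hs
    have hplen : p.length = d.length - t.length - 1 := by
      have := congrArg List.length hp
      simp at this
      omega
    rw [hk, PySem.Chars.pyGet?_eq_listPyGet?, PySem.List.pyGet?_natCast, ← hplen, ← hp]
    simp
  have htmp : pyRsplit1Head d ('.' :: t) = d.take (d.length - t.length - 1) := by
    unfold pyRsplit1Head
    rw [hr2, if_neg (by omega), PySem.Chars.slice_eq_listSlice, PySem.List.slice_to_natCast,
      Nat.sub_sub]
  unfold explodeStepA
  rw [hr, if_pos (by omega), if_pos (by omega), if_pos (by omega), if_pos hg4,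
    if_pos hl, htmp]
  set tmp := d.take (d.length - t.length - 1) with htmpdef
  unfold pvSplitAt
  by_cases hf : PySem.Chars.rfind tmp ['.'] = -1
  · rw [if_neg (by simpa using hf), if_pos hf]
  · obtain ⟨m, hmle, hme, hmp⟩ := pv_rfind_found tmp ['.'] hf
    obtain ⟨u, hu⟩ := hmp
    have hulen := congrArg List.length hu
    simp at hulen
    have hmlt : m < tmp.length := by omega
    have hu2 : u = tmp.drop (m + 1) := by
      have := congrArg List.tail hu
      simpa [List.tail_drop] using this
    have hcore : PySem.Chars.slice tmp (some (PySem.Chars.rfind tmp ['.'] + 1)) none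
        = tmp.drop (m + 1) := by
      rw [hme, PySem.Chars.slice_eq_listSlice]
      have : ((m : Int) + 1) = ((m + 1 : Nat) : Int) := by push_cast; omega
      rw [this, PySem.List.slice_from_natCast]
    have hsubcomp : pyRsplit1Head tmp ('.' :: tmp.drop (m + 1))
        = PySem.Chars.slice tmp none (some (PySem.Chars.rfind tmp ['.'])) := by
      have hsuf : ('.' :: tmp.drop (m + 1)) <:+ tmp := by
        have hu' : '.' :: u = tmp.drop m := hu
        rw [← hu2, hu']
        exact List.drop_suffix m tmp
      have hrr : PySem.Chars.rfind tmp ('.' :: tmp.drop (m + 1)) = (m : Int) := by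
        rw [pv_rfind_suffix tmp _ hsuf]
        congr 1
        simp only [List.length_cons, List.length_drop]
        omega
      unfold pyRsplit1Head
      rw [hrr, if_neg (by omega), hme]
    rw [if_pos (by simpa using hf), if_neg hf, hcore]
    simp only [hsubcomp]

lemma pv_stepA_invalid (d t : List Char) (st : List Char × List Char × List Char)
    (h : ¬ (t ≠ [] ∧ '.' :: t <:+ d ∧ st.2.2.length < t.length)) :
    explodeStepA d st t = st := by
  simp only [explodeStepA]
  split_ifs with h1 h2 h3 h4 h5 h6 <;> try rfl
  all_goals {
    exfalso
    apply h
    have ht : t ≠ [] := by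
      intro he
      rw [he] at h5
      simp at h5
    obtain ⟨m, hmle, hme, hmp⟩ := pv_rfind_found d t h1
    rw [hme] at h2 h3
    have hm : m = d.length - t.length ∧ t.length ≤ d.length ∧ m ≠ 0 := by
      refine ⟨by omega, by omega, by omega⟩
    have hteq : t = d.drop m := by
      refine hmp.eq_of_length ?_
      simp
      omega
    have hk : ((d.length : Int) - (t.length : Int) - 1) = ((m - 1 : Nat) : Int) := by omega
    rw [hk, PySem.Chars.pyGet?_eq_listPyGet?, PySem.List.pyGet?_natCast] at h4
    have hdot : d[m - 1]'(by omega) = '.' := by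
      have := List.getElem?_eq_getElem (l := d) (i := m - 1) (by omega)
      rw [this] at h4
      simpa using h4
    have hm1 : m - 1 + 1 = m := by omega
    have hdrop : d.drop (m - 1) = '.' :: t := by
      rw [List.drop_eq_getElem_cons (by omega : m - 1 < d.length), hdot, hm1, ← hteq]
    exact ⟨ht, hdrop ▸ List.drop_suffix (m - 1) d, h5⟩
  }

lemma pv_foldA (d : List Char) (ts : List (List Char)) (b : List Char) :
    ts.foldl (explodeStepA d) (pvState d b) = pvState d (ts.foldl (pvPick d) b) := by
  induction ts generalizing b with
  | nil => rfl
  | cons t ts ih =>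
    have hstep : explodeStepA d (pvState d b) t = pvState d (pvPick d b t) := by
      by_cases hc : t ≠ [] ∧ '.' :: t <:+ d ∧ b.length < t.length
      · rw [pv_stepA_valid d t _ hc.2.1 (by rw [pvState_snd]; exact hc.2.2)]
        unfold pvPick pvState
        rw [if_pos hc, if_neg hc.1]
      · rw [pv_stepA_invalid d t _ (by rw [pvState_snd]; exact hc)]
        unfold pvPick
        rw [if_neg hc]
    simp only [List.foldl_cons, hstep, ih]

-- two suffixes of the same list with equal lengths coincide
lemma pv_suffix_eq (d l₁ l₂ : List Char) (h₁ : l₁ <:+ d) (h₂ : l₂ <:+ d)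
    (hl : l₁.length = l₂.length) : l₁ = l₂ := by
  obtain ⟨p₁, hp₁⟩ := h₁
  obtain ⟨p₂, hp₂⟩ := h₂
  have e₁ := congrArg List.length hp₁
  have e₂ := congrArg List.length hp₂
  simp at e₁ e₂
  have hpp : p₁.length = p₂.length := by omega
  calc l₁ = (p₁ ++ l₁).drop p₁.length := (List.drop_left ..).symm
    _ = d.drop p₂.length := by rw [hp₁, hpp]
    _ = (p₂ ++ l₂).drop p₂.length := by rw [hp₂]
    _ = l₂ := List.drop_left ..

-- pvPick never shrinks the accumulator
lemma pv_pick_mono (d : List Char) (ts : List (List Char)) (b : List Char) :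
    b.length ≤ (ts.foldl (pvPick d) b).length := by
  induction ts generalizing b with
  | nil => simp
  | cons s ts ih =>
    refine le_trans ?_ (ih (pvPick d b s))
    unfold pvPick
    split_ifs with hc
    · omega
    · exact le_refl _

-- the fold keeps the longest usable tld of the list
lemma pv_pick_le (d : List Char) (ts : List (List Char)) (b t : List Char)
    (hmem : t ∈ ts) (ht : t ≠ []) (hs : '.' :: t <:+ d) :
    t.length ≤ (ts.foldl (pvPick d) b).length := by
  induction ts generalizing b with
  | nil => simp at hmem
  | cons s ts ih =>
    simp only [List.foldl_cons]
    rcases List.mem_cons.1 hmem with he | hmem'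
    · subst he
      refine le_trans ?_ (pv_pick_mono d ts (pvPick d b t))
      unfold pvPick
      split_ifs with hc
      · exact le_refl _
      · simp only [not_and, not_lt] at hc
        exact hc ht hs
    · exact ih (pvPick d b s) hmem'

lemma pv_pick_cases (d : List Char) (ts : List (List Char)) (b : List Char) :
    ts.foldl (pvPick d) b = b ∨
      ((ts.foldl (pvPick d) b) ∈ ts ∧ (ts.foldl (pvPick d) b) ≠ [] ∧
        '.' :: (ts.foldl (pvPick d) b) <:+ d) := by
  induction ts generalizing b with
  | nil => exact Or.inl rfl
  | cons s ts ih =>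
    simp only [List.foldl_cons]
    rcases ih (pvPick d b s) with he | ⟨hm, hne, hsfx⟩
    · rw [he]
      unfold pvPick
      split_ifs with hc
      · exact Or.inr ⟨List.mem_cons_self, hc.1, hc.2.1⟩
      · exact Or.inl rfl
    · exact Or.inr ⟨List.mem_cons_of_mem s hm, hne, hsfx⟩

-- B's scan reaches the same state
lemma pv_goB (d : List Char) (ts : List (List Char)) (rest pre : List Char)
    (hd : d = pre ++ rest)
    (hinv : ∀ t ∈ ts, t ≠ [] → '.' :: t <:+ d → t.length < rest.length) :
    explodeGoB (PySem.Set.ofList ts) pre rest = pvState d (ts.foldl (pvPick d) []) := by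
  induction rest generalizing pre with
  | nil =>
    have hnone : ts.foldl (pvPick d) [] = [] := by
      rcases pv_pick_cases d ts [] with he | ⟨hm, hne, hsfx⟩
      · exact he
      · exact absurd (hinv _ hm hne hsfx) (by simp)
    rw [hnone]
    rfl
  | cons c rest ih =>
    by_cases hhit : c = '.' ∧ rest ≠ [] ∧ rest ∈ PySem.Set.ofList ts
    · have hrmem : rest ∈ ts := (PySem.Set.mem_ofList ts rest).1 hhit.2.2
      have hrsfx : '.' :: rest <:+ d := ⟨pre, by rw [hd, hhit.1]⟩
      have hbest : ts.foldl (pvPick d) [] = rest := by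
        have hle : rest.length ≤ (ts.foldl (pvPick d) []).length :=
          pv_pick_le d ts [] rest hrmem hhit.2.1 hrsfx
        rcases pv_pick_cases d ts [] with he | ⟨hm, hne, hsfx⟩
        · rw [he] at hle
          simp at hle
          exact absurd hle hhit.2.1
        · have hlt := hinv _ hm hne hsfx
          simp only [List.length_cons] at hlt
          have : ('.' :: ts.foldl (pvPick d) []) = '.' :: rest :=
            pv_suffix_eq d _ _ hsfx hrsfx (by simp; omega)
          exact (List.cons_eq_cons.1 this).2
      have hpre : d.take (d.length - rest.length - 1) = pre := by
        have hlen : d.length = pre.length + (rest.length + 1) := by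
          rw [hd]; simp
        have : d.length - rest.length - 1 = pre.length := by omega
        rw [this, hd, List.take_left]
      simp only [explodeGoB, if_pos hhit, hbest]
      unfold pvState pvSplitAt
      rw [if_neg hhit.2.1, hpre]
    · have hd' : d = (pre ++ [c]) ++ rest := by rw [hd]; simp
      have hinv' : ∀ t ∈ ts, t ≠ [] → '.' :: t <:+ d → t.length < rest.length := by
        intro t hm hne hsfx
        have hlt := hinv t hm hne hsfx
        simp only [List.length_cons] at hlt
        rcases Nat.lt_or_ge t.length rest.length with h' | h'
        · exact h'
        · exfalso
          have heq : t.length = rest.length := by omega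
          have hcr : c :: rest <:+ d := ⟨pre, hd.symm⟩
          have : ('.' :: t) = c :: rest :=
            pv_suffix_eq d _ _ hsfx hcr (by simp [heq])
          obtain ⟨hc1, hc2⟩ := List.cons_eq_cons.1 this
          exact hhit ⟨hc1.symm, hc2 ▸ hne, (PySem.Set.mem_ofList ts rest).2 (hc2 ▸ hm)⟩
      simp only [explodeGoB, if_neg hhit]
      exact ih (pre ++ [c]) hd' hinv'

-- ===== VERDICT (by name: the statement is the Claim_ definition above) =====
theorem explode_domain_spec : Claim_equal_explode_domain := by
  intro domain alltld_list _
  have hA : alltld_list.foldl (fun st t => explodeStepA domain.toList st t.toList) ([], [], [])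
      = (alltld_list.map String.toList).foldl (explodeStepA domain.toList) (pvState domain.toList []) := by
    rw [List.foldl_map]; rfl
  have hB : explodeGoB (PySem.Set.ofList (alltld_list.map String.toList)) [] domain.toList
      = pvState domain.toList ((alltld_list.map String.toList).foldl (pvPick domain.toList) []) := by
    refine pv_goB domain.toList (alltld_list.map String.toList) domain.toList [] rfl ?_
    intro t _ ht hs
    have := hs.length_le
    simp only [List.length_cons] at this ⊢
    omega
  simp only [Spec_explode_domain, explode_domain, explode_domain_alt, hA, hB, pv_foldA]
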